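-- pv_equiv track=rewrite | github.com/dajku/Studia | Lab06/Python/mastermind.py | symulacja
-- ===== SOURCE A (Python) =====
-- def symulacja(kod1, kod2):
--     trafionych_lokalnie = 0
--     nietrafione_lokalnie = 0
--
--     kopia1 = kod1[:]
--     kopia2 = kod2[:]
--
--     for i in range(4):
--         if kopia1[i] == kopia2[i]:
--             trafionych_lokalnie += 1
--             kopia1[i] = -1
--             kopia2[i] = -1
--
--     for i in range(4):
--         if kopia1[i] != -1:
--             for j in range(4):
--                 if kopia2[j] != -1:
--                     if kopia1[i] == kopia2[j]:
--                         nietrafione_lokalnie += 1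
--                         kopia2[j] = -1
--                         break
--
--     return trafionych_lokalnie, nietrafione_lokalnie
-- ===== SOURCE B (Python) =====
-- def symulacja(kod1, kod2):
--     trafione = 0
--     reszta1 = []
--     reszta2 = []
--     for i in range(4):
--         if kod1[i] == kod2[i]:
--             trafione += 1
--         else:
--             reszta1.append(kod1[i])
--             reszta2.append(kod2[i])
--     licznik1 = {}
--     for kolor in reszta1:
--         licznik1[kolor] = licznik1.get(kolor, 0) + 1
--     licznik2 = {}
--     for kolor in reszta2:
--         licznik2[kolor] = licznik2.get(kolor, 0) + 1
--     nietrafione = sum(min(n, licznik2.get(kolor, 0)) for kolor, n in licznik1.items())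
--     return trafione, nietrafione
-- ===== Notes on version B (the rewrite author's own statement) =====
-- stated objective: simpler
-- what changed: B splits the four pegs once into exact matches and leftover colour lists, then replaces A's sentinel-mutating nested greedy scan by two occurrence-count dicts over the leftovers and a sum of per-colour minima.
-- intended difference: On inputs where both codes contain the colour -1 at non-matching positions among the first four pegs, A under-counts the partial matches because -1 collides with its internal sentinel and such pegs are silently skipped, while B counts -1 like any other colour, which is the intended Mastermind score. — e.g. on symulacja([-1, 1, 2, 3], [4, -1, 5, 6]): A returns (0, 0), B returns (0, 1)
import Mathlib
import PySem

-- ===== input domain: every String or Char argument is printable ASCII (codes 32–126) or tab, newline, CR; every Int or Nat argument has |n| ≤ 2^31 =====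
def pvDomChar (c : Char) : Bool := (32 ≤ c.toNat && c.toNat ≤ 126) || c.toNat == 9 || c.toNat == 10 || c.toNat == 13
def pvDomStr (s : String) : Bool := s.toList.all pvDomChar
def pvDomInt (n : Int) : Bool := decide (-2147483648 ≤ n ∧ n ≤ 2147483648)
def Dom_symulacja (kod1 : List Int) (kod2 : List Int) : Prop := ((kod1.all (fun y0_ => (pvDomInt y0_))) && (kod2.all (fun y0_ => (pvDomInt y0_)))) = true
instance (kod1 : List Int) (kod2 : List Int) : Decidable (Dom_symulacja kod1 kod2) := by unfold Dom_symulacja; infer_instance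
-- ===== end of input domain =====

set_option maxHeartbeats 1000000
set_option maxRecDepth 4096


-- B splits the four pegs once into exact matches and leftover colour lists, then replaces A's
-- sentinel-mutating nested greedy scan by two occurrence counters and a sum of per-colour minima
-- (objective: simpler); where the colour -1 occurs unmatched in both codes the values differ (D_ below).

-- ===== PORT A =====
-- inner 'for j in range(4): … break' loop: scans js, marks the first match with -1
def symInner (x : Int) (k2 : List Int) : List Int → Int × List Int
  | [] => (0, k2)
  | j :: js =>
    if PySem.List.pyGetD k2 j 0 ≠ -1 then
      if x = PySem.List.pyGetD k2 j 0 then (1, k2.set j.toNat (-1))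
      else symInner x k2 js
    else symInner x k2 js

-- first 'for i in range(4)' loop: exact matches, writing the -1 sentinels
def symPhase1 (kod1 kod2 : List Int) : Int × List Int × List Int :=
  (PySem.List.pyRange 0 4 1).foldl
    (fun st i =>
      if PySem.List.pyGetD st.2.1 i 0 = PySem.List.pyGetD st.2.2 i 0 then
        (st.1 + 1, st.2.1.set i.toNat (-1), st.2.2.set i.toNat (-1))
      else st)
    (0, kod1, kod2)

-- second 'for i in range(4)' loop over kopia1, with the inner scan over kopia2
def symPhase2 (kopia1 kopia2 : List Int) : Int × List Int :=
  (PySem.List.pyRange 0 4 1).foldl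
    (fun st i =>
      if PySem.List.pyGetD kopia1 i 0 ≠ -1 then
        let r := symInner (PySem.List.pyGetD kopia1 i 0) st.2 (PySem.List.pyRange 0 4 1)
        (st.1 + r.1, r.2)
      else st)
    (0, kopia2)

def symulacja (kod1 : List Int) (kod2 : List Int) : Int × Int :=
  let p := symPhase1 kod1 kod2
  let q := symPhase2 p.2.1 p.2.2
  (p.1, q.1)

-- ===== PORT B =====
def symulacja_alt (kod1 : List Int) (kod2 : List Int) : Int × Int :=
  -- 'for i in range(4): count exact, else append to reszta1/reszta2'
  let st := (PySem.List.pyRange 0 4 1).foldl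
    (fun st i =>
      if PySem.List.pyGetD kod1 i 0 = PySem.List.pyGetD kod2 i 0 then
        (st.1 + 1, st.2.1, st.2.2)
      else
        (st.1, st.2.1 ++ [PySem.List.pyGetD kod1 i 0], st.2.2 ++ [PySem.List.pyGetD kod2 i 0]))
    ((0 : Int), ([] : List Int), ([] : List Int))
  -- 'licznik[kolor] = licznik.get(kolor, 0) + 1' loops
  let licznik1 := st.2.1.foldl (fun d x => d.modify x 0 (· + 1)) (PySem.Dict.empty : PySem.Dict Int Int)
  let licznik2 := st.2.2.foldl (fun d x => d.modify x 0 (· + 1)) (PySem.Dict.empty : PySem.Dict Int Int)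
  let nietrafione : Int := (licznik1.items.map (fun kv => min kv.2 (licznik2.getD kv.1 0))).sum
  (st.1, nietrafione)

-- ===== PRECONDITION & SPEC =====
-- Pre_ excludes exactly the inputs on which A raises IndexError: a code list shorter than 4.
def Pre_symulacja (kod1 : List Int) (kod2 : List Int) : Prop :=
  4 ≤ kod1.length ∧ 4 ≤ kod2.length
instance (kod1 : List Int) (kod2 : List Int) : Decidable (Pre_symulacja kod1 kod2) := by
  unfold Pre_symulacja; infer_instance
def pvWitness_symulacja : List Int × List Int := ([1, 2, 3, 4], [4, 3, 2, 1])

-- On inputs where both codes contain the colour -1 at non-matching positions among the first four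
-- pegs, A under-counts the partial matches (such pegs collide with its internal sentinel and are
-- silently skipped), while B counts -1 like any other colour, which is the intended Mastermind score.
def D_symulacja (kod1 : List Int) (kod2 : List Int) : Prop :=
  (∃ p ∈ (kod1.take 4).zip (kod2.take 4), p.1 = -1 ∧ p.1 ≠ p.2) ∧
  (∃ p ∈ (kod1.take 4).zip (kod2.take 4), p.2 = -1 ∧ p.1 ≠ p.2)
instance (kod1 : List Int) (kod2 : List Int) : Decidable (D_symulacja kod1 kod2) := by
  unfold D_symulacja; infer_instance

def Spec_symulacja (kod1 : List Int) (kod2 : List Int) (out : Int × Int) : Prop :=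
  ¬ D_symulacja kod1 kod2 → out = symulacja_alt kod1 kod2
instance (kod1 : List Int) (kod2 : List Int) (out : Int × Int) :
    Decidable (Spec_symulacja kod1 kod2 out) := by unfold Spec_symulacja; infer_instance

def pvDiffWitness_symulacja : List Int × List Int := ([-1, 1, 2, 3], [4, -1, 5, 6])
def pvDiffWitnessOut_symulacja : (Int × Int) × (Int × Int) := ((0, 0), (0, 1))

-- ===== CLAIM (what is proved, stated in full; the proofs are below) =====
def Claim_unchanged_symulacja : Prop := ∀ (kod1 : List Int) (kod2 : List Int),
  Dom_symulacja kod1 kod2 → Pre_symulacja kod1 kod2 →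
  Spec_symulacja kod1 kod2 (symulacja kod1 kod2)
def Claim_changed_symulacja : Prop :=
  Dom_symulacja (pvDiffWitness_symulacja.1) (pvDiffWitness_symulacja.2) ∧
  Pre_symulacja (pvDiffWitness_symulacja.1) (pvDiffWitness_symulacja.2) ∧
  D_symulacja (pvDiffWitness_symulacja.1) (pvDiffWitness_symulacja.2) ∧
  symulacja (pvDiffWitness_symulacja.1) (pvDiffWitness_symulacja.2) = pvDiffWitnessOut_symulacja.1 ∧
  symulacja_alt (pvDiffWitness_symulacja.1) (pvDiffWitness_symulacja.2) = pvDiffWitnessOut_symulacja.2 ∧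
  pvDiffWitnessOut_symulacja.1 ≠ pvDiffWitnessOut_symulacja.2
def Claim_exact_symulacja : Prop := ∀ (kod1 : List Int) (kod2 : List Int),
  Dom_symulacja kod1 kod2 → Pre_symulacja kod1 kod2 → D_symulacja kod1 kod2 →
  symulacja kod1 kod2 ≠ symulacja_alt kod1 kod2

-- ===== LEMMAS AND PROOFS =====

-- value-level abstractions of A's loops (proof-side only)
def markFirst : List Int → Int → List Int
  | [], _ => []
  | y :: ys, x => if y = x then -1 :: ys else y :: markFirst ys x

def g4 : List Int → List Int → Int
  | [], _ => 0
  | x :: u, w => if x = -1 then g4 u w else if x ∈ w then 1 + g4 u (markFirst w x) else g4 u w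

def hGreedy : List Int → List Int → Int
  | [], _ => 0
  | x :: u, w => if x ∈ w then 1 + hGreedy u (w.erase x) else hGreedy u w

def aStepV (st : Int × List Int) (x : Int) : Int × List Int :=
  if x ≠ -1 then
    let r := symInner x st.2 [0, 1, 2, 3]
    (st.1 + r.1, r.2)
  else st

def mneg (x y : Int) : Int := if x = y then -1 else x

-- value-level abstraction of B's splitting loop (proof-side only)
def bPairStep (st : Int × List Int × List Int) (p : Int × Int) : Int × List Int × List Int :=
  if p.1 = p.2 then (st.1 + 1, st.2.1, st.2.2)
  else (st.1, st.2.1 ++ [p.1], st.2.2 ++ [p.2])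

lemma pyRange4 : PySem.List.pyRange 0 4 1 = [0, 1, 2, 3] := by decide

lemma length_markFirst (w : List Int) (x : Int) : (markFirst w x).length = w.length := by
  induction w with
  | nil => rfl
  | cons y ys ih => by_cases h : y = x <;> simp [markFirst, h, ih]

lemma inner_eq (x : Int) (w r : List Int) (hx : x ≠ -1) (hw : w.length = 4) :
    symInner x (w ++ r) [0, 1, 2, 3] =
      if x ∈ w then (1, markFirst w x ++ r) else ((0 : Int), w ++ r) := by
  rcases w with _ | ⟨v0, _ | ⟨v1, _ | ⟨v2, _ | ⟨v3, rest⟩⟩⟩⟩ <;> simp at hw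
  subst hw
  simp only [symInner, List.cons_append, List.nil_append]
  have g0 : PySem.List.pyGetD (v0::v1::v2::v3::r) (0:Int) 0 = v0 := by simp [pysem]
  have g1 : PySem.List.pyGetD (v0::v1::v2::v3::r) (1:Int) 0 = v1 := by simp [pysem]
  have g2 : PySem.List.pyGetD (v0::v1::v2::v3::r) (2:Int) 0 = v2 := by simp [pysem]
  have g3 : PySem.List.pyGetD (v0::v1::v2::v3::r) (3:Int) 0 = v3 := by simp [pysem]
  rw [g0, g1, g2, g3]
  split_ifs <;> simp_all [markFirst, List.set] <;> split_ifs <;> simp_all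

lemma foldV (u : List Int) : ∀ (w r : List Int) (n : Int), w.length = 4 →
    (List.foldl aStepV (n, w ++ r) u).1 = n + g4 u w := by
  induction u with
  | nil => intro w r n hw; simp [g4]
  | cons x u ih =>
    intro w r n hw
    rw [List.foldl_cons]
    by_cases hx : x = -1
    · simp only [aStepV, hx]
      simp [ih w r n hw, g4]
    · simp only [aStepV, if_pos (show x ≠ -1 from hx)]
      rw [inner_eq x w r hx hw]
      by_cases hm : x ∈ w
      · simp only [if_pos hm]
        rw [ih (markFirst w x) r (n + 1) (by rw [length_markFirst]; exact hw)]
        simp [g4, hx, hm]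
        ring
      · simp only [if_neg hm]
        rw [ih w r (n + 0) hw]
        simp [g4, hx, hm]

lemma pg0 (c0 c1 c2 c3 : Int) (r : List Int) : PySem.List.pyGetD (c0::c1::c2::c3::r) (0:Int) 0 = c0 := by simp [pysem]
lemma pg1 (c0 c1 c2 c3 : Int) (r : List Int) : PySem.List.pyGetD (c0::c1::c2::c3::r) (1:Int) 0 = c1 := by simp [pysem]
lemma pg2 (c0 c1 c2 c3 : Int) (r : List Int) : PySem.List.pyGetD (c0::c1::c2::c3::r) (2:Int) 0 = c2 := by simp [pysem]
lemma pg3 (c0 c1 c2 c3 : Int) (r : List Int) : PySem.List.pyGetD (c0::c1::c2::c3::r) (3:Int) 0 = c3 := by simp [pysem]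
lemma st0 (c0 c1 c2 c3 x : Int) (r : List Int) : (c0::c1::c2::c3::r).set (Int.toNat 0) x = x::c1::c2::c3::r := rfl
lemma st1 (c0 c1 c2 c3 x : Int) (r : List Int) : (c0::c1::c2::c3::r).set (Int.toNat 1) x = c0::x::c2::c3::r := by simp [List.set]
lemma st2 (c0 c1 c2 c3 x : Int) (r : List Int) : (c0::c1::c2::c3::r).set (Int.toNat 2) x = c0::c1::x::c3::r := by simp [List.set]
lemma st3 (c0 c1 c2 c3 x : Int) (r : List Int) : (c0::c1::c2::c3::r).set (Int.toNat 3) x = c0::c1::c2::x::r := by simp [List.set]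

lemma phase2_eq (x0 x1 x2 x3 : Int) (s : List Int) (w r : List Int) (hw : w.length = 4) :
    (symPhase2 (x0 :: x1 :: x2 :: x3 :: s) (w ++ r)).1 = g4 [x0, x1, x2, x3] w := by
  have e0 : PySem.List.pyGetD (x0::x1::x2::x3::s) (0:Int) 0 = x0 := pg0 _ _ _ _ _
  have e1 : PySem.List.pyGetD (x0::x1::x2::x3::s) (1:Int) 0 = x1 := pg1 _ _ _ _ _
  have e2 : PySem.List.pyGetD (x0::x1::x2::x3::s) (2:Int) 0 = x2 := pg2 _ _ _ _ _
  have e3 : PySem.List.pyGetD (x0::x1::x2::x3::s) (3:Int) 0 = x3 := pg3 _ _ _ _ _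
  have hconv : (symPhase2 (x0 :: x1 :: x2 :: x3 :: s) (w ++ r)).1
      = (List.foldl aStepV (0, w ++ r) [x0, x1, x2, x3]).1 := by
    unfold symPhase2
    simp only [pyRange4, List.foldl_cons, List.foldl_nil, aStepV, e0, e1, e2, e3]
  rw [hconv, foldV [x0, x1, x2, x3] w r 0 hw]
  simp

lemma phase1_eq (a0 a1 a2 a3 b0 b1 b2 b3 : Int) (r1 r2 : List Int) :
    symPhase1 (a0 :: a1 :: a2 :: a3 :: r1) (b0 :: b1 :: b2 :: b3 :: r2) =
      ((List.countP (fun p => p.1 == p.2) [(a0, b0), (a1, b1), (a2, b2), (a3, b3)] : Int),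
       mneg a0 b0 :: mneg a1 b1 :: mneg a2 b2 :: mneg a3 b3 :: r1,
       mneg b0 a0 :: mneg b1 a1 :: mneg b2 a2 :: mneg b3 a3 :: r2) := by
  unfold symPhase1
  simp only [pyRange4, List.foldl_cons, List.foldl_nil]
  simp only [pg0]
  split_ifs <;> (try simp only [pg0, pg1, pg2, pg3, st0, st1, st2, st3]) <;>
    (try split_ifs) <;> (try simp only [pg0, pg1, pg2, pg3, st0, st1, st2, st3]) <;>
      (try split_ifs) <;> (try simp only [pg0, pg1, pg2, pg3, st0, st1, st2, st3]) <;>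
        (try split_ifs) <;> (try simp only [pg0, pg1, pg2, pg3, st0, st1, st2, st3]) <;>
          simp_all [mneg, pg0, pg1, pg2, pg3, List.countP_cons, List.countP_nil] <;> omega

lemma bFold (ps : List (Int × Int)) : ∀ (n : Int) (xs ys : List Int),
    List.foldl bPairStep (n, xs, ys) ps =
      (n + (ps.countP (fun p => p.1 == p.2) : Int),
       xs ++ (ps.filter (fun p => p.1 != p.2)).map (·.1),
       ys ++ (ps.filter (fun p => p.1 != p.2)).map (·.2)) := by
  induction ps with
  | nil => intro n xs ys; simp
  | cons p ps ih =>
    intro n xs ys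
    rw [List.foldl_cons]
    by_cases h : p.1 = p.2 <;>
      simp_all [bPairStep, List.countP_cons, List.filter_cons] <;> omega

lemma flFst (ps : List (Int × Int)) :
    (ps.map (fun p => mneg p.1 p.2)).filter (fun y => y != -1) =
      ((ps.filter (fun p => p.1 != p.2)).map (·.1)).filter (fun y => y != -1) := by
  induction ps with
  | nil => simp
  | cons p ps ih =>
    obtain ⟨pa, pb⟩ := p
    by_cases h1 : pa = pb
    · subst h1; simp_all [mneg]
    · by_cases h2 : pa = (-1 : Int) <;> simp_all [mneg]

lemma flSnd (ps : List (Int × Int)) :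
    (ps.map (fun p => mneg p.2 p.1)).filter (fun y => y != -1) =
      ((ps.filter (fun p => p.1 != p.2)).map (·.2)).filter (fun y => y != -1) := by
  induction ps with
  | nil => simp
  | cons p ps ih =>
    obtain ⟨pa, pb⟩ := p
    by_cases h1 : pa = pb
    · subst h1; simp_all [mneg]
    · have h1' : ¬ pb = pa := fun h => h1 h.symm
      by_cases h3 : pb = (-1 : Int) <;> simp_all [mneg]

lemma filter_markFirst (w : List Int) (x : Int) (hx : x ≠ -1) :
    (markFirst w x).filter (fun y => y != -1) = ((w.filter (fun y => y != -1)).erase x) := by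
  induction w with
  | nil => simp [markFirst]
  | cons y ys ih =>
    by_cases hyx : y = x <;> by_cases hy : y = (-1 : Int) <;>
      simp_all [markFirst]

lemma g4_eq_h (u : List Int) : ∀ (w : List Int),
    g4 u w = hGreedy (u.filter (fun y => y != -1)) (w.filter (fun y => y != -1)) := by
  induction u with
  | nil => intro w; simp [g4, hGreedy]
  | cons x u ih =>
    intro w
    by_cases hx : x = -1
    · simp [g4, hx, ih]
    · by_cases hm : x ∈ w <;>
        simp [g4, hGreedy, hx, hm, ih, filter_markFirst _ _ hx, List.mem_filter]

lemma h_card (u : List Int) : ∀ (w : List Int),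
    hGreedy u w = ((Multiset.card ((↑u : Multiset Int) ∩ ↑w) : Nat) : Int) := by
  induction u with
  | nil => intro w; simp [hGreedy]
  | cons x u ih =>
    intro w
    by_cases hm : x ∈ w
    · have hmm : x ∈ (↑w : Multiset Int) := Multiset.mem_coe.mpr hm
      rw [hGreedy, if_pos hm, ← Multiset.cons_coe, Multiset.cons_inter_of_pos _ hmm,
        Multiset.card_cons, ih (w.erase x)]
      rw [Multiset.coe_erase]
      push_cast
      ring
    · have hmm : x ∉ (↑w : Multiset Int) := fun h => hm (Multiset.mem_coe.mp h)
      rw [hGreedy, if_neg hm, ← Multiset.cons_coe, Multiset.cons_inter_of_neg _ hmm, ih w]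

lemma card_inter_eq_sum (u w : List Int) :
    ((Multiset.card ((↑u : Multiset Int) ∩ ↑w) : Nat) : Int) =
      ((PySem.Set.ofList u).map (fun k => min ((u.count k : Int)) ((w.count k : Int)))).sum := by
  have hnd : (PySem.Set.ofList u).Nodup := PySem.Set.nodup_ofList u
  rw [← List.sum_toFinset _ hnd]
  have hts : (PySem.Set.ofList u).toFinset = u.toFinset := by
    ext k; simp [List.mem_toFinset, PySem.Set.mem_ofList]
  rw [hts]
  have hsub : ((↑u : Multiset Int) ∩ ↑w).toFinset ⊆ u.toFinset := by
    intro k hk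
    have h1 := Multiset.mem_toFinset.mp hk
    have h2 : k ∈ (↑u : Multiset Int) := (Multiset.mem_inter.mp h1).1
    exact List.mem_toFinset.mpr (Multiset.mem_coe.mp h2)
  have hcard := Multiset.toFinset_sum_count_eq ((↑u : Multiset Int) ∩ ↑w)
  have hext : ∑ k ∈ u.toFinset, ((↑u : Multiset Int) ∩ ↑w).count k
      = ∑ k ∈ ((↑u : Multiset Int) ∩ ↑w).toFinset, ((↑u : Multiset Int) ∩ ↑w).count k := by
    refine (Finset.sum_subset hsub ?_).symm
    intro k _ hk
    exact Multiset.count_eq_zero.mpr (fun h => hk (Multiset.mem_toFinset.mpr h))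
  have hmain : ((Multiset.card ((↑u : Multiset Int) ∩ ↑w) : Nat) : Int)
      = ∑ k ∈ u.toFinset, (((↑u : Multiset Int) ∩ ↑w).count k : Int) := by
    rw [← hcard, ← hext]; push_cast; rfl
  rw [hmain]
  refine Finset.sum_congr rfl ?_
  intro k _
  rw [Multiset.count_inter]
  simp [Multiset.coe_count, Nat.cast_min]

-- abbreviations for the leftover-colour lists and the intersection cardinality (proof-side only)
def uOf (ps : List (Int × Int)) : List Int := (ps.filter (fun p => p.1 != p.2)).map (·.1)
def wOf (ps : List (Int × Int)) : List Int := (ps.filter (fun p => p.1 != p.2)).map (·.2)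
def nn (l : List Int) : List Int := l.filter (fun y => y != -1)
def interCard (u w : List Int) : Int := ((Multiset.card ((↑u : Multiset Int) ∩ ↑w) : Nat) : Int)

-- splitting off the colour -1 from the intersection cardinality
lemma card_inter_split (u w : List Int) :
    interCard u w = interCard (nn u) (nn w)
      + min ((u.count (-1) : Int)) ((w.count (-1) : Int)) := by
  have key : ∀ s t : Multiset Int,
      Multiset.card (s ∩ t)
        = Multiset.card (s.filter (fun y => y ≠ -1) ∩ t.filter (fun y => y ≠ -1))
          + min (s.count (-1)) (t.count (-1)) := by
    intro s t
    have h1 : (s ∩ t).filter (fun y => y ≠ -1)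
        = s.filter (fun y => y ≠ -1) ∩ t.filter (fun y => y ≠ -1) := by
      ext a
      by_cases ha : a = (-1 : Int) <;>
        simp [Multiset.count_inter, Multiset.count_filter, ha]
    have h2 : (s ∩ t).filter (fun y => ¬ y ≠ -1) = (s ∩ t).filter (fun y => y = -1) := by
      apply Multiset.filter_congr
      intro x _
      constructor
      · intro h; exact not_not.mp h
      · intro h; exact not_not.mpr h
    have h3 : (s ∩ t).filter (fun y => y = -1)
        = Multiset.replicate ((s ∩ t).count (-1)) (-1) := by
      rw [← Multiset.filter_eq']
    have h4 := Multiset.filter_add_not (fun y => y ≠ -1) (s ∩ t)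
    calc Multiset.card (s ∩ t)
        = Multiset.card ((s ∩ t).filter (fun y => y ≠ -1)) +
            Multiset.card ((s ∩ t).filter (fun y => ¬ y ≠ -1)) := by
          rw [← Multiset.card_add, h4]
      _ = _ := by
          rw [h1, h2, h3, Multiset.card_replicate, Multiset.count_inter]
  have hl : ∀ l : List Int, l.filter (fun y => y != -1) = l.filter (fun y => decide (y ≠ -1)) :=
    fun l => List.filter_congr (fun x _ => by by_cases h : x = (-1 : Int) <;> simp [h])
  have hf : ∀ l : List Int, (↑(l.filter (fun y => y != -1)) : Multiset Int)
      = Multiset.filter (fun y => y ≠ -1) (↑l : Multiset Int) := by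
    intro l
    rw [hl]
    exact (Multiset.filter_coe _ _).symm
  have hk := key (↑u : Multiset Int) (↑w : Multiset Int)
  have hcu : (↑u : Multiset Int).count (-1) = u.count (-1) := by simp
  have hcw : (↑w : Multiset Int).count (-1) = w.count (-1) := by simp
  rw [hcu, hcw] at hk
  unfold interCard nn
  rw [hf, hf]
  omega

-- when the colour -1 is missing from one side, the -1-free intersection is the full one
lemma snd_eq (u w : List Int) (h : ¬((-1) ∈ u ∧ (-1) ∈ w)) :
    interCard (nn u) (nn w) = interCard u w := by
  have hs := card_inter_split u w
  have h1 : u.count (-1) = 0 ∨ w.count (-1) = 0 := by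
    rcases not_and_or.mp h with h | h
    · exact Or.inl (List.count_eq_zero.mpr h)
    · exact Or.inr (List.count_eq_zero.mpr h)
  omega

-- B's index loop is the pair-level fold
lemma bIdx (a0 a1 a2 a3 b0 b1 b2 b3 : Int) (r1 r2 : List Int) :
    (PySem.List.pyRange 0 4 1).foldl
      (fun st i =>
        if PySem.List.pyGetD (a0::a1::a2::a3::r1) i 0 = PySem.List.pyGetD (b0::b1::b2::b3::r2) i 0 then
          (st.1 + 1, st.2.1, st.2.2)
        else
          (st.1, st.2.1 ++ [PySem.List.pyGetD (a0::a1::a2::a3::r1) i 0],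
           st.2.2 ++ [PySem.List.pyGetD (b0::b1::b2::b3::r2) i 0]))
      ((0 : Int), ([] : List Int), ([] : List Int))
    = List.foldl bPairStep (0, [], []) [(a0,b0),(a1,b1),(a2,b2),(a3,b3)] := by
  simp only [pyRange4, List.foldl_cons, List.foldl_nil, pg0, pg1, pg2, pg3, bPairStep]

-- A's result in closed form
lemma hA_eq (a0 a1 a2 a3 b0 b1 b2 b3 : Int) (r1 r2 : List Int) :
    symulacja (a0::a1::a2::a3::r1) (b0::b1::b2::b3::r2) =
      ((([(a0,b0),(a1,b1),(a2,b2),(a3,b3)]).countP (fun p => p.1 == p.2) : Int),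
       interCard (nn (uOf [(a0,b0),(a1,b1),(a2,b2),(a3,b3)]))
                 (nn (wOf [(a0,b0),(a1,b1),(a2,b2),(a3,b3)]))) := by
  simp only [symulacja]
  rw [phase1_eq]
  rw [show mneg b0 a0 :: mneg b1 a1 :: mneg b2 a2 :: mneg b3 a3 :: r2
      = [mneg b0 a0, mneg b1 a1, mneg b2 a2, mneg b3 a3] ++ r2 from rfl]
  rw [phase2_eq (mneg a0 b0) (mneg a1 b1) (mneg a2 b2) (mneg a3 b3) r1
      [mneg b0 a0, mneg b1 a1, mneg b2 a2, mneg b3 a3] r2 rfl]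
  rw [show [mneg a0 b0, mneg a1 b1, mneg a2 b2, mneg a3 b3]
      = ([(a0,b0),(a1,b1),(a2,b2),(a3,b3)]).map (fun p => mneg p.1 p.2) from rfl]
  rw [show [mneg b0 a0, mneg b1 a1, mneg b2 a2, mneg b3 a3]
      = ([(a0,b0),(a1,b1),(a2,b2),(a3,b3)]).map (fun p => mneg p.2 p.1) from rfl]
  rw [g4_eq_h, h_card, flFst, flSnd]
  rfl

-- B's result in closed form
lemma hB_eq (a0 a1 a2 a3 b0 b1 b2 b3 : Int) (r1 r2 : List Int) :
    symulacja_alt (a0::a1::a2::a3::r1) (b0::b1::b2::b3::r2) =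
      ((([(a0,b0),(a1,b1),(a2,b2),(a3,b3)]).countP (fun p => p.1 == p.2) : Int),
       ((PySem.Set.ofList (uOf [(a0,b0),(a1,b1),(a2,b2),(a3,b3)])).map
         (fun k => min (((uOf [(a0,b0),(a1,b1),(a2,b2),(a3,b3)]).count k : Int))
                       (((wOf [(a0,b0),(a1,b1),(a2,b2),(a3,b3)]).count k : Int)))).sum) := by
  have hc : ∀ xs : List Int,
      xs.foldl (fun d x => d.modify x 0 (· + 1)) (PySem.Dict.empty : PySem.Dict Int Int)
        = PySem.Dict.counter xs := fun _ => rfl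
  simp only [symulacja_alt]
  rw [bIdx, bFold]
  simp only [zero_add, List.nil_append]
  rw [hc, hc]
  simp only [PySem.Dict.items_counter, List.map_map, PySem.Dict.getD_counter]
  rfl

-- B's per-colour minima sum is the intersection cardinality
lemma sum_eq_interCard (u w : List Int) :
    ((PySem.Set.ofList u).map (fun k => min ((u.count k : Int)) ((w.count k : Int)))).sum
      = interCard u w := by
  unfold interCard
  exact (card_inter_eq_sum u w).symm

-- D_ in terms of the leftover lists
lemma D_iff (a0 a1 a2 a3 b0 b1 b2 b3 : Int) (r1 r2 : List Int) :
    D_symulacja (a0::a1::a2::a3::r1) (b0::b1::b2::b3::r2) ↔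
      ((-1) ∈ uOf [(a0,b0),(a1,b1),(a2,b2),(a3,b3)] ∧
       (-1) ∈ wOf [(a0,b0),(a1,b1),(a2,b2),(a3,b3)]) := by
  unfold D_symulacja uOf wOf
  have hz : (((a0::a1::a2::a3::r1).take 4).zip ((b0::b1::b2::b3::r2).take 4))
      = [(a0,b0),(a1,b1),(a2,b2),(a3,b3)] := rfl
  rw [hz]
  simp only [List.mem_map, List.mem_filter, bne_iff_ne, ne_eq]
  constructor
  · rintro ⟨⟨p, hp, hp1, hp2⟩, ⟨q, hq, hq2, hq12⟩⟩
    exact ⟨⟨p, ⟨hp, hp2⟩, hp1⟩, ⟨q, ⟨hq, hq12⟩, hq2⟩⟩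
  · rintro ⟨⟨p, ⟨hp, hp2⟩, hp1⟩, ⟨q, ⟨hq, hq12⟩, hq2⟩⟩
    exact ⟨⟨p, hp, hp1, hp2⟩, ⟨q, hq, hq2, hq12⟩⟩

-- ===== VERDICT (by name: the statement is the Claim_ definition above) =====
theorem symulacja_spec : Claim_unchanged_symulacja := by
  intro kod1 kod2 _ hpre
  obtain ⟨hl1, hl2⟩ := hpre
  rcases kod1 with _ | ⟨a0, _ | ⟨a1, _ | ⟨a2, _ | ⟨a3, r1⟩⟩⟩⟩ <;> simp at hl1
  rcases kod2 with _ | ⟨b0, _ | ⟨b1, _ | ⟨b2, _ | ⟨b3, r2⟩⟩⟩⟩ <;> simp at hl2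
  unfold Spec_symulacja
  intro hnd
  rw [hA_eq, hB_eq, sum_eq_interCard]
  have hd := mt (D_iff a0 a1 a2 a3 b0 b1 b2 b3 r1 r2).mpr hnd
  rw [snd_eq _ _ hd]
theorem symulacja_changed : Claim_changed_symulacja := by
  unfold Claim_changed_symulacja; decide
theorem symulacja_tight : Claim_exact_symulacja := by
  intro kod1 kod2 _ hpre hd
  obtain ⟨hl1, hl2⟩ := hpre
  rcases kod1 with _ | ⟨a0, _ | ⟨a1, _ | ⟨a2, _ | ⟨a3, r1⟩⟩⟩⟩ <;> simp at hl1
  rcases kod2 with _ | ⟨b0, _ | ⟨b1, _ | ⟨b2, _ | ⟨b3, r2⟩⟩⟩⟩ <;> simp at hl2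
  intro heq
  rw [hA_eq, hB_eq, sum_eq_interCard] at heq
  have h2 := congrArg Prod.snd heq
  simp only at h2
  obtain ⟨hm1, hm2⟩ := (D_iff a0 a1 a2 a3 b0 b1 b2 b3 r1 r2).mp hd
  have hc1 : (uOf [(a0,b0),(a1,b1),(a2,b2),(a3,b3)]).count (-1) ≠ 0 :=
    fun h => (List.count_eq_zero.mp h) hm1
  have hc2 : (wOf [(a0,b0),(a1,b1),(a2,b2),(a3,b3)]).count (-1) ≠ 0 :=
    fun h => (List.count_eq_zero.mp h) hm2
  have hs := card_inter_split (uOf [(a0,b0),(a1,b1),(a2,b2),(a3,b3)])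
    (wOf [(a0,b0),(a1,b1),(a2,b2),(a3,b3)])
  omega
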